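-- pv_equiv track=rewrite | github.com/fmay/ziggyusaurus | scan_sidebar_files.py | is_inside_code_block
-- ===== SOURCE A (Python) =====
-- def is_inside_code_block(content: str, search_text: str) -> bool:
--     """Check if the search text is inside a code block (```...```)."""
--     lines = content.split('\n')
--     in_code_block = False
--     code_block_start = -1
--
--     for i, line in enumerate(lines):
--         # Check for code block markers
--         if line.strip().startswith('```'):
--             if not in_code_block:
--                 # Starting a code block
--                 in_code_block = True
--                 code_block_start = i
--             else:
--                 # Ending a code block
--                 in_code_block = False
--                 code_block_start = -1
--             continue
--
--         # If we're in a code block and find the search text, return True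
--         if in_code_block and search_text in line:
--             return True
--
--     return False
-- ===== SOURCE B (Python) =====
-- def is_inside_code_block(content: str, search_text: str) -> bool:
--     """Block-chunking scan: repeatedly locate the next fence-delimited block and
--     search its body, instead of toggling a per-line boolean state."""
--     lines = content.split('\n')
--     n = len(lines)
--     i = 0
--     while True:
--         # skip forward to the next opening fence
--         while i < n and not lines[i].strip().startswith('```'):
--             i += 1
--         if i == n:
--             return False
--         i += 1  # step past the opening fence
--         start = i
--         # the block body runs to the next fence (or to the end of the file)
--         while i < n and not lines[i].strip().startswith('```'):
--             i += 1
--         if any(search_text in l for l in lines[start:i]):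
--             return True
--         if i == n:
--             return False
--         i += 1  # step past the closing fence
-- ===== Notes on version B (the rewrite author's own statement) =====
-- stated objective: alternative
-- what changed: Replaces A's per-line boolean toggle state machine with a block-chunking two-pointer scan that repeatedly jumps to the next opening fence, delimits the whole block body, and searches that chunk at once.
import Mathlib
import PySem

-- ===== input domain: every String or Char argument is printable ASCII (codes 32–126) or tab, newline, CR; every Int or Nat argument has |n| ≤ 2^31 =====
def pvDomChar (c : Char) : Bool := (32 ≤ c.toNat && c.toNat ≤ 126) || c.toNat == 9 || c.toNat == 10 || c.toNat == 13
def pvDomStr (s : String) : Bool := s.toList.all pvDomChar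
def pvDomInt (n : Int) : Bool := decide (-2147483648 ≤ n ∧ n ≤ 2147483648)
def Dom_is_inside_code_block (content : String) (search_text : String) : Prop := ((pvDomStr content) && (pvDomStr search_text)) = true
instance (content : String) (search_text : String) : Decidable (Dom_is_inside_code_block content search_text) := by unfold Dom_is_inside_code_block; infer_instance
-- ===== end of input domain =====

-- B replaces A's per-line in_code_block toggle with a block-chunking scan that
-- repeatedly delimits the next fence-bounded block and searches its body at once
-- (objective: alternative).

-- ===== PORT A =====
-- the for-loop with early return, state (in_code_block, code_block_start)
def pvALoop (search_text : String) : List String → Bool → Int → Bool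
  | [], _, _ => false
  | line :: rest, in_code_block, code_block_start =>
    if PySem.Str.startswith (PySem.Str.strip line) "```" then
      if !in_code_block then
        pvALoop search_text rest true 0      -- code_block_start := i (never read for the result; dummy)
      else
        pvALoop search_text rest false (-1)
    else if in_code_block && PySem.Str.isIn search_text line then
      true
    else
      pvALoop search_text rest in_code_block code_block_start

def is_inside_code_block (content : String) (search_text : String) : Bool :=
  pvALoop search_text ((PySem.Str.split? content "\n").getD []) false (-1)

-- ===== PORT B =====
def pvIsFence (l : String) : Bool := PySem.Str.startswith (PySem.Str.strip l) "```"

-- Source B's outer while-loop: skip to the next opening fence (dropWhile = the first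
-- inner while over index i), take the block body (takeWhile = the second inner
-- while), search that chunk, then continue after the closing fence.
def pvBlocks (search_text : String) (rest : List String) : Bool :=
  match h1 : rest.dropWhile (fun l => !pvIsFence l) with
  | [] => false
  | _ :: after_open =>
    let body := after_open.takeWhile (fun l => !pvIsFence l)
    if body.any (fun l => PySem.Str.isIn search_text l) then true
    else
      match h2 : after_open.dropWhile (fun l => !pvIsFence l) with
      | [] => false
      | _ :: rest' => pvBlocks search_text rest'
termination_by rest.length
decreasing_by
  have a1 : (rest.dropWhile (fun l => !pvIsFence l)).length ≤ rest.length :=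
    List.length_dropWhile_le _ _
  have a2 : (after_open.dropWhile (fun l => !pvIsFence l)).length ≤ after_open.length :=
    List.length_dropWhile_le _ _
  rw [h1] at a1; rw [h2] at a2
  simp at a1 a2; omega

def is_inside_code_block_alt (content : String) (search_text : String) : Bool :=
  pvBlocks search_text ((PySem.Str.split? content "\n").getD [])

-- ===== PRECONDITION & SPEC =====
def Spec_is_inside_code_block (content : String) (search_text : String) (out : Bool) : Prop := out = is_inside_code_block_alt content search_text
instance (content : String) (search_text : String) (out : Bool) : Decidable (Spec_is_inside_code_block content search_text out) := by unfold Spec_is_inside_code_block; infer_instance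

-- ===== CLAIM (what is proved, stated in full; the proofs are below) =====
def Claim_equal_is_inside_code_block : Prop := ∀ (content : String) (search_text : String), Dom_is_inside_code_block content search_text → Spec_is_inside_code_block content search_text (is_inside_code_block content search_text)

-- ===== LEMMAS AND PROOFS =====

set_option maxHeartbeats 1000000

-- continuation after the closing fence (proof-only helper)
def pvContAfter (s : String) : List String → Bool
  | [] => false
  | _ :: r => pvALoop s r false (-1)

-- in the open-block state, A's loop searches the body up to the next fence, then
-- continues in the closed state after it
theorem pvALoop_inside (s : String) (lines : List String) :
    ∀ (st : Int), pvALoop s lines true st =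
      ((lines.takeWhile (fun l => !pvIsFence l)).any (fun l => PySem.Str.isIn s l) ||
        pvContAfter s (lines.dropWhile (fun l => !pvIsFence l))) := by
  induction lines with
  | nil => intro st; simp [pvALoop, pvContAfter]
  | cons l r ih =>
    intro st
    by_cases hf : pvIsFence l = true
    · have hf' : (PySem.Str.startswith (PySem.Str.strip l) "```") = true := hf
      simp only [pvALoop, hf', List.takeWhile_cons, List.dropWhile_cons, hf,
        Bool.not_true, Bool.not_false]
      simp [pvContAfter]
    · have hf0 : pvIsFence l = false := by revert hf; cases pvIsFence l <;> simp
      have hf' : (PySem.Str.startswith (PySem.Str.strip l) "```") = false := hf0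
      simp only [pvALoop, hf', List.takeWhile_cons, List.dropWhile_cons, hf0,
        Bool.not_false, Bool.not_true, List.any_cons]
      cases hin : PySem.Str.isIn s l with
      | false =>
        have hin' : PySem.Chars.isIn s.toList l.toList = false := hin
        simp only [hin', Bool.false_or, Bool.true_and, Bool.false_eq_true, if_false, if_true, List.any_cons, hin]
        exact ih st
      | true =>
        have hin' : PySem.Chars.isIn s.toList l.toList = true := hin
        simp [hin']

-- in the closed state, A's loop skips every non-fence line
theorem pvALoop_skip (s : String) (lines : List String) (st : Int) :
    pvALoop s lines false st =
      pvALoop s (lines.dropWhile (fun l => !pvIsFence l)) false st := by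
  induction lines with
  | nil => rfl
  | cons l r ih =>
    by_cases hf : pvIsFence l = true
    · simp [List.dropWhile_cons, hf]
    · have hf0 : pvIsFence l = false := by revert hf; cases pvIsFence l <;> simp
      have hf' : (PySem.Str.startswith (PySem.Str.strip l) "```") = false := hf0
      simp only [pvALoop, hf', List.dropWhile_cons, hf0, Bool.not_false,
        Bool.false_and]
      simpa using ih

-- A's loop in the closed state equals B's block-chunking recursion
theorem pvALoop_eq_pvBlocks (s : String) (lines : List String) (st : Int) :
    pvALoop s lines false st = pvBlocks s lines := by
  induction hn : lines.length using Nat.strong_induction_on generalizing lines st with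
  | _ n ih =>
  rw [pvALoop_skip]
  rw [pvBlocks]
  cases h1 : lines.dropWhile (fun l => !pvIsFence l) with
  | nil => simp [pvALoop]
  | cons f after_open =>
    have hf : pvIsFence f = true := by
      have := List.head?_dropWhile_not (fun l => !pvIsFence l) lines
      rw [h1] at this; simpa using this
    have hf' : (PySem.Str.startswith (PySem.Str.strip f) "```") = true := hf
    simp only [pvALoop, hf', Bool.not_true]
    rw [pvALoop_inside]
    have hlen1 : after_open.length < n := by
      have := List.length_dropWhile_le (fun l => !pvIsFence l) lines
      rw [h1] at this; simp at this; omega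
    cases hb : (after_open.takeWhile (fun l => !pvIsFence l)).any (fun l => PySem.Str.isIn s l) with
    | true => simp [hb]
    | false =>
      simp only [hb, Bool.false_or]
      cases h2 : after_open.dropWhile (fun l => !pvIsFence l) with
      | nil => simp [pvContAfter]
      | cons g rest' =>
        have hlen2 : rest'.length < n := by
          have := List.length_dropWhile_le (fun l => !pvIsFence l) after_open
          rw [h2] at this; simp at this; omega
        simp only [pvContAfter, Bool.false_eq_true, if_false]
        exact ih rest'.length hlen2 rest' (-1) rfl

-- ===== VERDICT (by name: the statement is the Claim_ definition above) =====
theorem is_inside_code_block_spec : Claim_equal_is_inside_code_block := by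
  intro content search_text _
  unfold Spec_is_inside_code_block is_inside_code_block is_inside_code_block_alt
  exact pvALoop_eq_pvBlocks search_text _ (-1)
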